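-- pv_equiv track=rewrite | github.com/Philofive/pgn2tex | pgn2tex_start_sol.py | convert_san_letters
-- ===== SOURCE A (Python) =====
-- MAP_GERMAN = {"K":"K","Q":"D","R":"T","B":"L","N":"S"}
--
-- MAP_SYMBOL_TEX = {"K": r"\king{}", "Q": r"\queen{}", "R": r"\rook{}", "B": r"\bishop{}", "N": r"\knight{}"}
--
-- def convert_san_letters(san: str, notation: str) -> str:
--     """
--     english  -> unverändert
--     german   -> K/D/T/L/S
--     symbols  -> LaTeX-Makros aus skak/xskak (\king{}, \queen{} ...)
--     Achtet auch auf Promotion (=Q, =N, ...).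
--     """
--     if notation == "english":
--         return san
--     if notation == "german":
--         for en, de in MAP_GERMAN.items():
--             san = san.replace("="+en, "="+de)  # Promotion zuerst
--             san = san.replace(en, de)
--         return san
--     # symbols: LaTeX-Makros (keine Unicode-Zeichen!)
--     for en, macro in MAP_SYMBOL_TEX.items():
--         san = san.replace("="+en, "="+macro)  # e8=\queen{}
--         san = san.replace(en, macro)          # \knight{}f3
--     return san
-- ===== SOURCE B (Python) =====
-- MAP_GERMAN = {"K": "K", "Q": "D", "R": "T", "B": "L", "N": "S"}
--
-- MAP_SYMBOL_TEX = {"K": r"\king{}", "Q": r"\queen{}", "R": r"\rook{}", "B": r"\bishop{}", "N": r"\knight{}"}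
--
--
-- def convert_san_letters(san: str, notation: str) -> str:
--     if notation == "english":
--         return san
--     table = str.maketrans(MAP_GERMAN if notation == "german" else MAP_SYMBOL_TEX)
--     return san.translate(table)
-- ===== Notes on version B (the rewrite author's own statement) =====
-- stated objective: idiomatic
-- what changed: Replaces the ten sequential str.replace scans (two per piece letter) with one translation table built by str.maketrans and a single char-by-char san.translate pass.
import Mathlib
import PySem

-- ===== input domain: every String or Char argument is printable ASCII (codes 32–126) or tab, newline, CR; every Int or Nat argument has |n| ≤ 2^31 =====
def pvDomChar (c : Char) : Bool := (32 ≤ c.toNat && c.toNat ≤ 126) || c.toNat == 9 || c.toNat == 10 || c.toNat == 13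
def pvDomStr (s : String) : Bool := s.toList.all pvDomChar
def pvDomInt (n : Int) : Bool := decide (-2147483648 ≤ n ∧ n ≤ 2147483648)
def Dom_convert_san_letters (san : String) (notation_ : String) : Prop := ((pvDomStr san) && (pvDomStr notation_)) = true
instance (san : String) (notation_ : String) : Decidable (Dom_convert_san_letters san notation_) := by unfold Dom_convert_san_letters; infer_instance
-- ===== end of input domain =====

-- B replaces A's ten sequential str.replace scans with one prebuilt per-char translation table
-- and a single pass over the string (idiomatic str.maketrans/translate).


-- ===== PORT A =====
-- MAP_GERMAN.items() / MAP_SYMBOL_TEX.items() in insertion order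
def pvMapGerman : List (String × String) := [("K", "K"), ("Q", "D"), ("R", "T"), ("B", "L"), ("N", "S")]
def pvMapSymbolTex : List (String × String) :=
  [("K", "\\king{}"), ("Q", "\\queen{}"), ("R", "\\rook{}"), ("B", "\\bishop{}"), ("N", "\\knight{}")]

-- body of A's for-loop: san = san.replace("="+en, "="+de); san = san.replace(en, de)
def pvStep (s : String) (p : String × String) : String :=
  PySem.Str.replace (PySem.Str.replace s ("=" ++ p.1) ("=" ++ p.2)) p.1 p.2

def convert_san_letters (san : String) (notation_ : String) : String :=
  if notation_ == "english" then san
  else if notation_ == "german" then pvMapGerman.foldl pvStep san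
  else pvMapSymbolTex.foldl pvStep san

-- ===== PORT B =====
-- str.maketrans(MAP_GERMAN) as a per-char table (a char may map to a multi-char string)
def pvGermanTable (c : Char) : List Char :=
  if c = 'K' then ['K'] else if c = 'Q' then ['D'] else if c = 'R' then ['T']
  else if c = 'B' then ['L'] else if c = 'N' then ['S'] else [c]

-- str.maketrans(MAP_SYMBOL_TEX) as a per-char table
def pvSymbolTable (c : Char) : List Char :=
  if c = 'K' then "\\king{}".toList else if c = 'Q' then "\\queen{}".toList
  else if c = 'R' then "\\rook{}".toList else if c = 'B' then "\\bishop{}".toList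
  else if c = 'N' then "\\knight{}".toList else [c]

-- san.translate(table): one pass over san through the prebuilt table
def convert_san_letters_alt (san : String) (notation_ : String) : String :=
  if notation_ == "english" then san
  else String.ofList (san.toList.flatMap (if notation_ == "german" then pvGermanTable else pvSymbolTable))

-- ===== PRECONDITION & SPEC =====
def Spec_convert_san_letters (san : String) (notation_ : String) (out : String) : Prop := out = convert_san_letters_alt san notation_
instance (san : String) (notation_ : String) (out : String) : Decidable (Spec_convert_san_letters san notation_ out) := by unfold Spec_convert_san_letters; infer_instance

-- ===== CLAIM (what is proved, stated in full; the proofs are below) =====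
def Claim_equal_convert_san_letters : Prop := ∀ (san : String) (notation_ : String), Dom_convert_san_letters san notation_ → Spec_convert_san_letters san notation_ (convert_san_letters san notation_)

-- ===== LEMMAS AND PROOFS =====

-- single-char substitution function: what replacing the one-char pattern [c] by t does per char
def pvSub (c : Char) (t : List Char) (d : Char) : List Char := if d = c then t else [d]

theorem pv_flatMap_sub_of_not_mem {c : Char} {t : List Char} (u : List Char) (hu : c ∉ u) :
    u.flatMap (pvSub c t) = u := by
  induction u with
  | nil => rfl
  | cons d u ih =>
    simp only [List.mem_cons, not_or] at hu
    simp [pvSub, List.flatMap_cons, Ne.symm hu.1, ih hu.2]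

-- replace.go with a one-char pattern is the per-char substitution
theorem pv_go_single (c : Char) (t : List Char) :
    ∀ (fuel : Nat) (l acc : List Char), l.length ≤ fuel →
      PySem.Chars.replace.go [c] t fuel l acc = acc.reverse ++ l.flatMap (pvSub c t) := by
  intro fuel
  induction fuel with
  | zero =>
    intro l acc h
    have : l = [] := List.eq_nil_of_length_eq_zero (Nat.le_zero.mp h)
    subst this
    simp [PySem.Chars.replace.go]
  | succ fuel ih =>
    intro l acc h
    cases l with
    | nil => simp [PySem.Chars.replace.go]
    | cons d l' =>
      rw [PySem.Chars.replace.go]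
      simp only [List.length_cons] at h
      by_cases hd : d = c
      · subst hd
        have hpre : [d].isPrefixOf (d :: l') = true := by simp [List.isPrefixOf]
        rw [if_pos hpre]
        have hdrop : List.drop ([d].length) (d :: l') = l' := rfl
        rw [hdrop, ih _ _ (by omega)]
        simp [pvSub, List.flatMap_cons]
      · have hbe : (c == d) = false := beq_eq_false_iff_ne.mpr (Ne.symm hd)
        have hpre : List.isPrefixOf [c] (d :: l') = false := by
          simp [List.isPrefixOf, hbe]
        rw [if_neg (by simp [hpre])]
        rw [ih _ _ (by omega)]
        simp [pvSub, hd, List.flatMap_cons]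

-- replacing a pattern by itself is the identity
theorem pv_go_id (old : List Char) (hold : old ≠ []) :
    ∀ (fuel : Nat) (l acc : List Char), l.length ≤ fuel →
      PySem.Chars.replace.go old old fuel l acc = acc.reverse ++ l := by
  intro fuel
  induction fuel with
  | zero =>
    intro l acc h
    have : l = [] := List.eq_nil_of_length_eq_zero (Nat.le_zero.mp h)
    subst this
    simp [PySem.Chars.replace.go]
  | succ fuel ih =>
    intro l acc h
    cases l with
    | nil => simp [PySem.Chars.replace.go]
    | cons d l' =>
      rw [PySem.Chars.replace.go]
      simp only [List.length_cons] at h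
      by_cases hpre : old.isPrefixOf (d :: l') = true
      · rw [if_pos hpre]
        obtain ⟨rest, hrest⟩ := List.isPrefixOf_iff_prefix.mp hpre
        have hdrop : List.drop old.length (d :: l') = rest := by
          rw [← hrest, List.drop_left]
        have hlen : rest.length ≤ fuel := by
          have h1 : old.length + rest.length = l'.length + 1 := by
            have := congrArg List.length hrest
            simpa [List.length_append] using this
          have h2 : 1 ≤ old.length := List.length_pos_of_ne_nil hold
          omega
        rw [hdrop, ih _ _ hlen]
        simp [← hrest]
      · rw [if_neg hpre]
        rw [ih _ _ (by omega)]
        simp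

-- "=X" -> "="+t replacement is absorbed by the following per-char X -> t substitution
theorem pv_go_absorb (c : Char) (t : List Char) (_hc : c ≠ '=') (ht : c ∉ t) :
    ∀ (fuel : Nat) (l acc : List Char), l.length ≤ fuel →
      (PySem.Chars.replace.go ['=', c] ('=' :: t) fuel l acc).flatMap (pvSub c t)
        = acc.reverse.flatMap (pvSub c t) ++ l.flatMap (pvSub c t) := by
  intro fuel
  induction fuel with
  | zero =>
    intro l acc h
    have : l = [] := List.eq_nil_of_length_eq_zero (Nat.le_zero.mp h)
    subst this
    simp [PySem.Chars.replace.go]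
  | succ fuel ih =>
    intro l acc h
    cases l with
    | nil => simp [PySem.Chars.replace.go]
    | cons d l' =>
      rw [PySem.Chars.replace.go]
      simp only [List.length_cons] at h
      by_cases hpre : List.isPrefixOf ['=', c] (d :: l') = true
      · rw [if_pos hpre]
        obtain ⟨rest, hrest⟩ := List.isPrefixOf_iff_prefix.mp hpre
        have hshape : '=' :: c :: rest = d :: l' := by simpa using hrest
        injection hshape with hd htail
        subst hd
        subst htail
        have hlen : rest.length ≤ fuel := by
          simp only [List.length_cons] at h
          omega
        have hdrop : List.drop (['=', c].length) ('=' :: c :: rest) = rest := rfl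
        rw [hdrop, ih _ _ hlen]
        have htid : t.flatMap (pvSub c t) = t := pv_flatMap_sub_of_not_mem t ht
        simp only [List.reverse_append, List.reverse_cons, List.flatMap_append,
          List.flatMap_cons, List.flatMap_reverse, List.append_assoc, List.reverse_reverse]
        simp [pvSub, htid]
      · rw [if_neg hpre]
        rw [ih _ _ (by omega)]
        simp [List.flatMap_cons]

-- the two replaces A performs for one letter, on the list side
theorem pv_pair_replace (c : Char) (t : List Char) (hc : c ≠ '=') (ht : c ∉ t) (l : List Char) :
    PySem.Chars.replace (PySem.Chars.replace l ['=', c] ('=' :: t)) [c] t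
      = l.flatMap (pvSub c t) := by
  have h1 : PySem.Chars.replace l ['=', c] ('=' :: t)
      = PySem.Chars.replace.go ['=', c] ('=' :: t) l.length l [] := by
    simp [PySem.Chars.replace]
  have h2 : ∀ m : List Char, PySem.Chars.replace m [c] t = m.flatMap (pvSub c t) := by
    intro m
    simp only [PySem.Chars.replace, List.isEmpty_cons, if_neg Bool.false_ne_true]
    simpa using pv_go_single c t m.length m [] (le_refl _)
  rw [h1, h2]
  simpa using pv_go_absorb c t hc ht l.length l [] (le_refl _)

-- a replace of a nonempty pattern by itself is the identity
theorem pv_replace_self (old : List Char) (hold : old ≠ []) (m : List Char) :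
    PySem.Chars.replace m old old = m := by
  have : old.isEmpty = false := by simp [List.isEmpty_eq_false_iff, hold]
  simp only [PySem.Chars.replace, this, if_neg Bool.false_ne_true]
  simpa using pv_go_id old hold m.length m [] (le_refl _)

-- one A step on strings, as a per-char flatMap
theorem pv_step_eq (s : String) (en de : String) (c : Char) (t : List Char)
    (hen : en.toList = [c]) (hde : de.toList = t) (hc : c ≠ '=') (ht : c ∉ t) :
    (pvStep s (en, de)).toList = s.toList.flatMap (pvSub c t) := by
  simp only [pvStep, PySem.Str.replace, String.toList_ofList, String.toList_append,
    hen, hde]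
  have h1 : "=".toList ++ [c] = ['=', c] := by simp
  have h2 : "=".toList ++ t = '=' :: t := by
    have : "=".toList = ['='] := by decide
    simp [this]
  rw [h1, h2, pv_pair_replace c t hc ht]

-- the identity step (the german "K" -> "K" pair)
theorem pv_step_id (s : String) : (pvStep s ("K", "K")).toList = s.toList := by
  simp only [pvStep, PySem.Str.replace, String.toList_ofList, String.toList_append]
  have h1 : "=".toList ++ "K".toList = '=' :: "K".toList := by
    have : "=".toList = ['='] := by decide
    simp [this]
  rw [h1, pv_replace_self ('=' :: "K".toList) (by simp),
    pv_replace_self ("K".toList) (by decide)]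

-- the german four-substitution chain is one pass through the table
theorem pv_german_chain (l : List Char) :
    ((((l.flatMap (pvSub 'Q' ['D'])).flatMap (pvSub 'R' ['T'])).flatMap
        (pvSub 'B' ['L'])).flatMap (pvSub 'N' ['S']))
      = l.flatMap pvGermanTable := by
  induction l with
  | nil => rfl
  | cons d l ih =>
    simp only [List.flatMap_cons, List.flatMap_append]
    rw [ih]
    congr 1
    by_cases h1 : d = 'Q'; · subst h1; decide
    by_cases h2 : d = 'R'; · subst h2; decide
    by_cases h3 : d = 'B'; · subst h3; decide
    by_cases h4 : d = 'N'; · subst h4; decide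
    by_cases h5 : d = 'K'; · subst h5; decide
    simp [pvSub, pvGermanTable, h1, h2, h3, h4, h5, List.flatMap_cons]

-- the symbols five-substitution chain is one pass through the table
theorem pv_symbol_chain (l : List Char) :
    (((((l.flatMap (pvSub 'K' "\\king{}".toList)).flatMap
          (pvSub 'Q' "\\queen{}".toList)).flatMap
          (pvSub 'R' "\\rook{}".toList)).flatMap
          (pvSub 'B' "\\bishop{}".toList)).flatMap
          (pvSub 'N' "\\knight{}".toList))
      = l.flatMap pvSymbolTable := by
  induction l with
  | nil => rfl
  | cons d l ih =>
    simp only [List.flatMap_cons, List.flatMap_append]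
    rw [ih]
    congr 1
    by_cases h1 : d = 'K'; · subst h1; decide
    by_cases h2 : d = 'Q'; · subst h2; decide
    by_cases h3 : d = 'R'; · subst h3; decide
    by_cases h4 : d = 'B'; · subst h4; decide
    by_cases h5 : d = 'N'; · subst h5; decide
    simp [pvSub, pvSymbolTable, h1, h2, h3, h4, h5, List.flatMap_cons]

-- ===== VERDICT (by name: the statement is the Claim_ definition above) =====
theorem convert_san_letters_spec : Claim_equal_convert_san_letters := by
  intro san notation_ _hdom
  unfold Spec_convert_san_letters convert_san_letters convert_san_letters_alt
  by_cases h1 : notation_ == "english"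
  · simp [h1]
  · rw [if_neg h1, if_neg h1]
    by_cases h2 : notation_ == "german"
    · rw [if_pos h2, if_pos h2]
      simp only [pvMapGerman, List.foldl_cons, List.foldl_nil]
      have htl :
          (pvStep (pvStep (pvStep (pvStep (pvStep san ("K", "K")) ("Q", "D")) ("R", "T"))
              ("B", "L")) ("N", "S")).toList
            = san.toList.flatMap pvGermanTable := by
        rw [pv_step_eq _ "N" "S" 'N' ['S'] (by decide) (by decide) (by decide) (by decide)]
        rw [pv_step_eq _ "B" "L" 'B' ['L'] (by decide) (by decide) (by decide) (by decide)]
        rw [pv_step_eq _ "R" "T" 'R' ['T'] (by decide) (by decide) (by decide) (by decide)]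
        rw [pv_step_eq _ "Q" "D" 'Q' ['D'] (by decide) (by decide) (by decide) (by decide)]
        rw [pv_step_id]
        exact pv_german_chain san.toList
      calc pvStep (pvStep (pvStep (pvStep (pvStep san ("K", "K")) ("Q", "D")) ("R", "T"))
              ("B", "L")) ("N", "S")
          = String.ofList ((pvStep (pvStep (pvStep (pvStep (pvStep san ("K", "K")) ("Q", "D"))
              ("R", "T")) ("B", "L")) ("N", "S")).toList) := by simp
        _ = String.ofList (san.toList.flatMap pvGermanTable) := by rw [htl]
    · rw [if_neg h2, if_neg h2]
      simp only [pvMapSymbolTex, List.foldl_cons, List.foldl_nil]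
      have htl :
          (pvStep (pvStep (pvStep (pvStep (pvStep san ("K", "\\king{}")) ("Q", "\\queen{}"))
              ("R", "\\rook{}")) ("B", "\\bishop{}")) ("N", "\\knight{}")).toList
            = san.toList.flatMap pvSymbolTable := by
        rw [pv_step_eq _ "N" "\\knight{}" 'N' "\\knight{}".toList (by decide) rfl (by decide) (by decide)]
        rw [pv_step_eq _ "B" "\\bishop{}" 'B' "\\bishop{}".toList (by decide) rfl (by decide) (by decide)]
        rw [pv_step_eq _ "R" "\\rook{}" 'R' "\\rook{}".toList (by decide) rfl (by decide) (by decide)]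
        rw [pv_step_eq _ "Q" "\\queen{}" 'Q' "\\queen{}".toList (by decide) rfl (by decide) (by decide)]
        rw [pv_step_eq _ "K" "\\king{}" 'K' "\\king{}".toList (by decide) rfl (by decide) (by decide)]
        exact pv_symbol_chain san.toList
      calc pvStep (pvStep (pvStep (pvStep (pvStep san ("K", "\\king{}")) ("Q", "\\queen{}"))
              ("R", "\\rook{}")) ("B", "\\bishop{}")) ("N", "\\knight{}")
          = String.ofList ((pvStep (pvStep (pvStep (pvStep (pvStep san ("K", "\\king{}"))
              ("Q", "\\queen{}")) ("R", "\\rook{}")) ("B", "\\bishop{}")) ("N", "\\knight{}")).toList) := by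
            simp
        _ = String.ofList (san.toList.flatMap pvSymbolTable) := by rw [htl]
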